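-- pv_equiv track=rewrite | github.com/thecode00/Algorithm-Problem-Solve | Programmers/Python/Level 2/2개 이하로 다른 비트/solution.py | solution
-- ===== SOURCE A (Python) =====
-- def solution(numbers):  # 두번째 코드, 홀수에서 0비트를 찾는부분을 개선
--     answer = []
--     for num in numbers:
--         # 짝수는 LSB가 항상 0이므로 1을 더해주면 됨
--         if num % 2 == 0:
--             answer.append(num + 1)
--         else:
--             compare_bit = 1
--             while True:
--                 if not (compare_bit & num):
--                     break
--                 # 1비트의 위치를 왼쪽으로 한칸씩 옮김
--                 compare_bit *= 2
--             # 가장 낮은위치에있는 0비트의 위치를 찾은후 그 비트의 오른쪽에있는 1비트의 위치로 옮긴다음 더하면 그 1비트는 0이되고 0비트는 1이됨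
--             # Ex. 11(1011) + 2(0010) = 13(1101)
--             compare_bit >>= 1
--             answer.append(compare_bit + num)
--
--     return answer
-- ===== SOURCE B (Python) =====
-- def _fix(n):
--     # nearest larger number differing in at most two bits:
--     # if n % 4 != 3 the lowest zero bit is bit 0 or bit 1, so the answer is n + 1;
--     # otherwise the two low bits are 11 and the answer is found recursively on n // 2.
--     if n % 4 != 3:
--         return n + 1
--     return 2 * _fix(n // 2) + 1
--
--
-- def solution(numbers):
--     return [_fix(num) for num in numbers]
-- ===== Notes on version B (the rewrite author's own statement) =====
-- stated objective: simpler
-- what changed: A scans bit positions with a while-loop doubling a compare mask to locate the lowest unset bit; B has no bit operations at all and maps each element through a short recursion on n % 4 (n % 4 != 3 gives n+1, otherwise recurse on n // 2 and return 2*f(n//2)+1).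
import Mathlib
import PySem

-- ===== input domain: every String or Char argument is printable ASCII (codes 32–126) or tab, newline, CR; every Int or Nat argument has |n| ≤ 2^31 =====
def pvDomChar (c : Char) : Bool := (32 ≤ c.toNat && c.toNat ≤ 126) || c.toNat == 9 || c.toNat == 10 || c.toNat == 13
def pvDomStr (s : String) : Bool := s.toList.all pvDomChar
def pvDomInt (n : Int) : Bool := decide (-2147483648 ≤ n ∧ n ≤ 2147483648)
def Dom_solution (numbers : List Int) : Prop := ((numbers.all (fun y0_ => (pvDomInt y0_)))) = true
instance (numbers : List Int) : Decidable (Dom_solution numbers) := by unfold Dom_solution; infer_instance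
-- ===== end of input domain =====

-- B replaces A's per-element while-loop bit scan by a short recursion on n % 4 (no bit operations); objective: simpler.

-- ===== PORT A =====
-- the while loop: doubles compareBit until compareBit & num == 0, then returns compareBit.
-- fuel 100 is never exhausted on the admitted inputs (|num| ≤ 2^31, num ≠ -1).
def solGoA (fuel : Nat) (compareBit num : Int) : Int :=
  match fuel with
  | 0 => compareBit
  | fuel+1 =>
    if Int.land compareBit num == 0 then compareBit  -- Python 'compare_bit & num' ported exactly as two's-complement Int.land
    else solGoA fuel (compareBit * 2) num

def solution (numbers : List Int) : List Int :=
  numbers.foldl (fun answer num =>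
    if PySem.Int.mod num 2 == 0 then answer ++ [num + 1]
    else
      let compareBit := solGoA 100 1 num
      let compareBit := PySem.Int.floordiv compareBit 2  -- Python 'compare_bit >>= 1' is exactly floor division by 2
      answer ++ [compareBit + num]) []

-- ===== PORT B =====
-- fuel 100 is never exhausted on the admitted inputs; the fuel-0 value is never reached there.
def fixAlt (fuel : Nat) (n : Int) : Int :=
  match fuel with
  | 0 => n + 1
  | fuel+1 =>
    if PySem.Int.mod n 4 != 3 then n + 1
    else 2 * fixAlt fuel (PySem.Int.floordiv n 2) + 1

def solution_alt (numbers : List Int) : List Int := numbers.map (fixAlt 100)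

-- ===== PRECONDITION & SPEC =====
-- Pre_ excludes lists containing -1: there A's while-loop never terminates (every bit of -1 is set), and B's recursion does not terminate either.
def Pre_solution (numbers : List Int) : Prop := (-1 : Int) ∉ numbers
instance (numbers : List Int) : Decidable (Pre_solution numbers) := by unfold Pre_solution; infer_instance
def pvWitness_solution : List Int := [2, 7, 11, -3, 0, 1022]
def Spec_solution (numbers : List Int) (out : List Int) : Prop := out = solution_alt numbers
instance (numbers : List Int) (out : List Int) : Decidable (Spec_solution numbers out) := by unfold Spec_solution; infer_instance

-- ===== CLAIM (what is proved, stated in full; the proofs are below) =====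
def Claim_equal_solution : Prop := ∀ (numbers : List Int), Dom_solution numbers → Pre_solution numbers → Spec_solution numbers (solution numbers)

-- ===== LEMMAS AND PROOFS =====

theorem bodd_iff_emod (n : Int) : Int.bodd n = true ↔ n % 2 = 1 := by
  have h := Int.bodd_add_div2 n
  cases hb : Int.bodd n
  · simp only [hb, Bool.cond_false] at h; simp only [Bool.false_eq_true, false_iff]; omega
  · simp only [hb, Bool.cond_true] at h; simp only [true_iff]; omega

theorem zldiff (n : Nat) : Nat.ldiff 0 n = 0 := by
  apply Nat.eq_of_testBit_eq; intro i; simp [Nat.testBit_ldiff]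

theorem zland (m : Int) : Int.land 0 m = 0 := by
  cases m <;> simp [Int.land, zldiff]

theorem land_double (c n : Int) : Int.land (2*c) n = 2 * Int.land c (Int.div2 n) := by
  conv_lhs => rw [← Int.bit_decomp n]
  have h2c : (2*c : Int) = Int.bit false c := by simp [Int.bit_val]
  rw [h2c, Int.land_bit]
  simp [Int.bit_val]

theorem land_one (n : Int) : Int.land 1 n = if Int.bodd n then 1 else 0 := by
  conv_lhs => rw [← Int.bit_decomp n]
  have h1 : (1 : Int) = Int.bit true 0 := by simp [Int.bit_val]
  rw [h1, Int.land_bit]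
  cases hb : Int.bodd n <;> simp [Int.bit_val, zland]

theorem div2_eq_fdiv (n : Int) : Int.div2 n = PySem.Int.floordiv n 2 := by
  rw [Int.div2_val, PySem.Int.floordiv_eq_ediv_of_pos (by norm_num)]

theorem solGoA_stop (f : Nat) (c n : Int) (h : Int.land c n = 0) : solGoA f c n = c := by
  cases f <;> simp [solGoA, h]

theorem solGoA_scale (f : Nat) (c n : Int) :
    solGoA f (2*c) n = 2 * solGoA f c (Int.div2 n) := by
  induction f generalizing c with
  | zero => simp [solGoA]
  | succ f ih =>
    simp only [solGoA, land_double]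
    by_cases h : Int.land c (Int.div2 n) = 0
    · simp [h]
    · have h2 : ¬ (2 * Int.land c (Int.div2 n) = 0) := by omega
      simp only [beq_iff_eq, h2, if_false, h]
      have : 2 * c * 2 = 2 * (c * 2) := by ring
      rw [this, ih]

-- per-element equality, by induction on the fuel; adequacy: |n+1| ≤ 2^f
theorem elem_eq (f : Nat) (n : Int) (hne : n ≠ -1) (hf : (n+1).natAbs ≤ 2^f) :
    (if PySem.Int.mod n 2 == 0 then n + 1
     else PySem.Int.floordiv (solGoA f 1 n) 2 + n) = fixAlt f n := by
  induction f generalizing n with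
  | zero =>
    have h2 : PySem.Int.mod n 2 = n % 2 := PySem.Int.mod_eq_emod_of_pos (by norm_num)
    have : n % 2 = 0 := by omega
    simp [fixAlt, this]
  | succ f ih =>
    have h2 : PySem.Int.mod n 2 = n % 2 := PySem.Int.mod_eq_emod_of_pos (by norm_num)
    have h4 : PySem.Int.mod n 4 = n % 4 := PySem.Int.mod_eq_emod_of_pos (by norm_num)
    by_cases he : n % 2 = 0
    · have : ¬ (n % 4 = 3) := by omega
      simp [fixAlt, he, this]
    · -- n odd
      have hb : Int.bodd n = true := (bodd_iff_emod n).2 (by omega)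
      have hstep : solGoA (f+1) 1 n = solGoA f 2 n := by
        simp [solGoA, land_one, hb]
      by_cases h41 : n % 4 = 3
      · -- recursive case
        have hm : Int.div2 n = PySem.Int.floordiv n 2 := div2_eq_fdiv n
        have hfd : PySem.Int.floordiv n 2 = n / 2 := PySem.Int.floordiv_eq_ediv_of_pos (by norm_num)
        set m := n / 2 with hmdef
        have hn2 : n = 2 * m + 1 := by omega
        have hmne : m ≠ -1 := by omega
        have hmodd : m % 2 = 1 := by omega
        -- f ≥ 1 is forced: n % 4 = 3 and n ≠ -1 give |n+1| ≥ 4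
        match f, hf with
        | 0, hf => exfalso; omega
        | f+1, hf =>
          have hmf : (m+1).natAbs ≤ 2^(f+1) := by
            have : (2:Nat)^(f+1+1) = 2 * 2^(f+1) := by ring
            omega
          have ihm := ih m hmne hmf
          have hmb : Int.bodd m = true := (bodd_iff_emod m).2 hmodd
          have hms : solGoA (f+1) 1 m = solGoA f 2 m := by
            simp [solGoA, land_one, hmb]
          have hsc : solGoA f 2 m = 2 * solGoA f 1 (Int.div2 m) := by
            have := solGoA_scale f 1 m; simpa using this
          set t := solGoA f 1 (Int.div2 m) with htdef
          have hs : solGoA (f+1) 1 m = 2 * t := by rw [hms, hsc]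
          have hA : solGoA (f+1+1) 1 n = 2 * solGoA (f+1) 1 m := by
            rw [hstep]
            have hsc2 := solGoA_scale (f+1) 1 n
            rw [show (2:Int)*1 = 2 from by ring] at hsc2
            rw [hsc2, hm, hfd]
          have hmod2m : PySem.Int.mod m 2 = m % 2 := PySem.Int.mod_eq_emod_of_pos (by norm_num)
          have ihm2 : PySem.Int.floordiv (solGoA (f+1) 1 m) 2 + m = fixAlt (f+1) m := by
            simpa [hmod2m, hmodd] using ihm
          have hfd2 : PySem.Int.floordiv (2*t) 2 = t := by
            rw [PySem.Int.floordiv_eq_ediv_of_pos (by norm_num)]; omega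
          rw [hs, hfd2] at ihm2
          have hBfix : fixAlt (f+1+1) n = 2 * fixAlt (f+1) (PySem.Int.floordiv n 2) + 1 := by
            simp [fixAlt, h41]
          have hlhs : PySem.Int.floordiv (solGoA (f+1+1) 1 n) 2 + n = 2*t + n := by
            rw [hA, hs, PySem.Int.floordiv_eq_ediv_of_pos (by norm_num)]; omega
          have hne2 : ¬ (PySem.Int.mod n 2 == 0) = true := by simp [PySem.Int.mod_eq_emod_of_pos (show (0:Int) < 2 by norm_num)]; omega
          simp only [hne2, if_false]
          rw [hlhs, hBfix, hfd, ← ihm2, hn2]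
          simp; ring
      · -- n % 4 = 1 : the loop stops at compareBit = 2
        have hstop : solGoA f 2 n = 2 := by
          apply solGoA_stop
          have hld : Int.land 2 n = 2 * Int.land 1 (Int.div2 n) := by
            have := land_double 1 n; simpa using this
          rw [hld, land_one]
          have hm2 : Int.div2 n = n / 2 := Int.div2_val n
          have hbf : Int.bodd (Int.div2 n) = false := by
            cases h : Int.bodd (Int.div2 n)
            · rfl
            · exfalso; have := (bodd_iff_emod _).1 h; rw [hm2] at this; omega
          simp [hbf]
        have h43 : ¬ (n % 4 = 3) := by omega
        have hne2 : ¬ (PySem.Int.mod n 2 == 0) = true := by simp [PySem.Int.mod_eq_emod_of_pos (show (0:Int) < 2 by norm_num)]; omega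
        have hf1 : PySem.Int.floordiv (2:Int) 2 = 1 := by decide
        simp [fixAlt, h43, hstep, hstop]
        omega

theorem solution_go (l acc : List Int) (hdom : Dom_solution l) (hpre : Pre_solution l) :
    List.foldl (fun answer num =>
      if PySem.Int.mod num 2 == 0 then answer ++ [num + 1]
      else
        let compareBit := solGoA 100 1 num
        let compareBit := PySem.Int.floordiv compareBit 2
        answer ++ [compareBit + num]) acc l = acc ++ l.map (fixAlt 100) := by
  induction l generalizing acc with
  | nil => simp
  | cons x xs ih =>
    have hdom2 : pvDomInt x = true ∧ Dom_solution xs := by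
      unfold Dom_solution at hdom ⊢
      rw [List.all_cons, Bool.and_eq_true] at hdom
      exact hdom
    have hxne : x ≠ -1 := fun h => hpre (by simp [h])
    have hpre2 : Pre_solution xs := fun h => hpre (List.mem_cons_of_mem _ h)
    have hxf : (x+1).natAbs ≤ 2^100 := by
      have := hdom2.1
      simp only [pvDomInt, decide_eq_true_eq] at this
      have hp : (2147483648 + 2 : Nat) ≤ 2^100 := by norm_num
      omega
    have hx := elem_eq 100 x hxne hxf
    simp only [List.foldl_cons, List.map_cons]
    by_cases hc : (PySem.Int.mod x 2 == 0) = true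
    · rw [if_pos hc] at hx
      rw [if_pos hc, ih _ hdom2.2 hpre2]
      simp [hx]
    · rw [if_neg hc] at hx
      rw [if_neg hc, ih _ hdom2.2 hpre2]
      simp [← hx]

-- ===== VERDICT (by name: the statement is the Claim_ definition above) =====
theorem solution_spec : Claim_equal_solution := by
  intro numbers hdom hpre
  unfold Spec_solution solution solution_alt
  rw [solution_go numbers [] hdom hpre]
  simp
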